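-- pv_equiv track=rewrite | github.com/DoubleLZ0591/DreamSchool | 1.py | least_subsequence
-- ===== SOURCE A (Python) =====
-- def least_subsequence(source, target):
--     i, j = 0, 0
--     min_sub = 0
--     flag = False
--     while j < len(target):
--         for i in range(len(source)):
--             if i < len(source) and j < len(target) and source[i] == target[j]:
--                 j += 1
--                 flag = True
--         if flag:
--             min_sub += 1
--             flag = False
--         else:
--             min_sub = -1
--             break
--     return min_sub
-- ===== SOURCE B (Python) =====
-- def _find_from(source, ch, start):
--     for k in range(start, len(source)):
--         if source[k] == ch:
--             return k
--     return None
--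
--
-- def least_subsequence(source, target):
--     passes = 0
--     start = len(source)  # forces the first character to open a new pass
--     for ch in target:
--         k = _find_from(source, ch, start)
--         if k is None:
--             k = _find_from(source, ch, 0)
--             if k is None:
--                 return -1
--             passes += 1
--         start = k + 1
--     return passes
-- ===== Notes on version B (the rewrite author's own statement) =====
-- stated objective: alternative
-- what changed: B drives the computation by the target characters with a moving search position into source (jumping to the next occurrence, restarting a pass only when none remains), instead of A's repeated full scans of source per pass with a flag.
import Mathlib
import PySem

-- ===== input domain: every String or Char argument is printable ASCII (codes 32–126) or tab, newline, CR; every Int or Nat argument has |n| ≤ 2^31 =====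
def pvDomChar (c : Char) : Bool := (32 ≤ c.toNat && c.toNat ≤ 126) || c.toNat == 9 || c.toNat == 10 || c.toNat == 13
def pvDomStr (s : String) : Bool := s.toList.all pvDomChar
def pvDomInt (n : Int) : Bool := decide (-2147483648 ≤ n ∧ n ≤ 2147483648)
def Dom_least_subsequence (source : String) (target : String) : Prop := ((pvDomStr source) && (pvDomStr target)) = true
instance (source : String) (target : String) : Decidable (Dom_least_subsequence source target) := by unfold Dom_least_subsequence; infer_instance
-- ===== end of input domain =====

-- B restructures A: instead of rescanning all of source once per pass with a flag, B walks the
-- target once keeping a search position into source and jumps to the next occurrence of each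
-- character (restarting a pass only when none remains); same return value, no speed claim.

-- ===== PORT A =====
-- inner for-loop of A: iterates over the remaining characters of source (source[i] = current
-- char; the guard `i < len(source)` of A is always true inside the for and is dropped),
-- state (j, flag) exactly as in A
def aInner (t : List Char) : List Char → Nat → Bool → Nat × Bool
  | [], j, flag => (j, flag)
  | c :: ss, j, flag =>
    if j < t.length ∧ t[j]? = some c then aInner t ss (j + 1) true
    else aInner t ss j flag

-- termination fact the outer while-loop needs: a pass that sets the flag advanced j
theorem aInner_le (t ss : List Char) (j : Nat) (f : Bool) : j ≤ (aInner t ss j f).1 := by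
  induction ss generalizing j f with
  | nil => simp [aInner]
  | cons c ss ih =>
    simp only [aInner]
    split
    · exact le_trans (Nat.le_succ j) (ih (j + 1) true)
    · exact ih j f

theorem aInner_flag_lt (t ss : List Char) (j : Nat) :
    (aInner t ss j false).2 = true → j < (aInner t ss j false).1 := by
  have key : ∀ ss (j : Nat) (f : Bool), (aInner t ss j f).2 = true → f = true ∨ j < (aInner t ss j f).1 := by
    intro ss
    induction ss with
    | nil => intro j f h; simp [aInner] at h; exact Or.inl h
    | cons c ss ih =>
      intro j f h
      simp only [aInner] at h ⊢
      split at h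
      · right
        have := aInner_le t ss (j + 1) true
        split <;> omega
      · rcases ih j f h with h' | h'
        · exact Or.inl h'
        · right; split <;> [skip; exact h']
          · have := aInner_le t ss (j + 1) true
            omega
  intro h
  rcases key ss j false h with h' | h'
  · simp at h'
  · exact h'

-- outer while-loop of A; min_sub is the accumulator
def aLoop (s t : List Char) (j : Nat) (min_sub : Int) : Int :=
  if h : j < t.length then
    let p := aInner t s j false
    if hf : p.2 = true then aLoop s t p.1 (min_sub + 1) else -1
  else min_sub
termination_by t.length - j
decreasing_by
  have := aInner_flag_lt t s j hf
  omega

def least_subsequence (source : String) (target : String) : Int :=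
  aLoop source.toList target.toList 0 0

-- ===== PORT B =====
-- _find_from of Source B: first index k ≥ start with source[k] = ch, None if there is none
def findFrom (s : List Char) (c : Char) (start : Nat) : Option Nat :=
  if h : start < s.length then
    if s[start] = c then some start else findFrom s c (start + 1)
  else none
termination_by s.length - start

-- the for-loop of Source B over the target characters, state (passes, start)
def bGo (s : List Char) : List Char → Int → Nat → Int
  | [], passes, _ => passes
  | c :: rest, passes, start =>
    match findFrom s c start with
    | some k => bGo s rest passes (k + 1)
    | none =>
      match findFrom s c 0 with
      | none => -1
      | some k => bGo s rest (passes + 1) (k + 1)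

def least_subsequence_alt (source : String) (target : String) : Int :=
  bGo source.toList target.toList 0 source.toList.length

-- ===== PRECONDITION & SPEC =====
def Spec_least_subsequence (source : String) (target : String) (out : Int) : Prop := out = least_subsequence_alt source target
instance (source : String) (target : String) (out : Int) : Decidable (Spec_least_subsequence source target out) := by unfold Spec_least_subsequence; infer_instance

-- ===== CLAIM (what is proved, stated in full; the proofs are below) =====
def Claim_equal_least_subsequence : Prop := ∀ (source : String) (target : String), Dom_least_subsequence source target → Spec_least_subsequence source target (least_subsequence source target)

-- ===== LEMMAS AND PROOFS =====

-- suffix of ss strictly after the first occurrence of c, none if c ∉ ss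
def splitFirst : List Char → Char → Option (List Char)
  | [], _ => none
  | e :: ss, c => if e = c then some ss else splitFirst ss c

-- remaining target after one greedy left-to-right pass of the source suffix ss
def onePass : List Char → List Char → List Char
  | _, [] => []
  | [], t => t
  | c :: ss, d :: t => if c = d then onePass ss t else onePass ss (d :: t)

theorem onePass_suffix (ss t : List Char) : onePass ss t <:+ t := by
  induction ss generalizing t with
  | nil => cases t <;> simp [onePass]
  | cons c ss ih =>
    cases t with
    | nil => simp [onePass]
    | cons d t =>
      simp only [onePass]
      split
      · exact (ih t).trans (List.suffix_cons d t)
      · exact ih (d :: t)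

theorem onePass_len_le (ss t : List Char) : (onePass ss t).length ≤ t.length :=
  (onePass_suffix ss t).length_le

theorem onePass_none (ss : List Char) (c : Char) (rest : List Char)
    (h : splitFirst ss c = none) : onePass ss (c :: rest) = c :: rest := by
  induction ss with
  | nil => simp [onePass]
  | cons e ss ih =>
    simp only [splitFirst] at h
    split at h
    · simp at h
    · simp only [onePass]
      rw [if_neg (by assumption)]
      exact ih h

theorem onePass_some (ss : List Char) (c : Char) (rest ss' : List Char)
    (h : splitFirst ss c = some ss') : onePass ss (c :: rest) = onePass ss' rest := by
  induction ss generalizing ss' with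
  | nil => simp [splitFirst] at h
  | cons e ss ih =>
    simp only [splitFirst] at h
    split at h
    · simp only [Option.some.injEq] at h
      subst h
      simp only [onePass]
      rw [if_pos (by assumption)]
    · simp only [onePass]
      rw [if_neg (by assumption)]
      exact ih ss' h

-- A reference machine: one greedy pass at a time on the full source
def aRef (s : List Char) (u : List Char) (p : Int) : Int :=
  if u = [] then p
  else
    if h : (onePass s u).length < u.length then aRef s (onePass s u) (p + 1) else -1
termination_by u.length

-- findFrom searched on indices agrees with splitFirst on the dropped suffix
theorem findFrom_none (s : List Char) (c : Char) (st : Nat) :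
    findFrom s c st = none ↔ splitFirst (s.drop st) c = none := by
  induction hn : s.length - st using Nat.strong_induction_on generalizing st with
  | _ n ih =>
    rw [findFrom]
    split
    · rename_i h
      rw [List.drop_eq_getElem_cons h]
      simp only [splitFirst]
      split
      · simp
      · rename_i hne
        have : s.length - (st + 1) < n := by omega
        exact (by simpa using ih _ this (st + 1) rfl)
    · rename_i h
      rw [List.drop_eq_nil_of_le (by omega)]
      simp [splitFirst]

theorem findFrom_some (s : List Char) (c : Char) (st k : Nat)
    (h : findFrom s c st = some k) : splitFirst (s.drop st) c = some (s.drop (k + 1)) := by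
  induction hn : s.length - st using Nat.strong_induction_on generalizing st with
  | _ n ih =>
    rw [findFrom] at h
    split at h
    · rename_i hlt
      rw [List.drop_eq_getElem_cons hlt]
      simp only [splitFirst]
      split at h
      · simp only [Option.some.injEq] at h
        subst h
        rw [if_pos (by assumption)]
      · rename_i hne
        rw [if_neg hne]
        have : s.length - (st + 1) < n := by omega
        exact ih _ this (st + 1) h rfl
    · simp at h

-- B reference machine on source suffixes
def bRef (s : List Char) : List Char → List Char → Int → Int
  | _, [], p => p
  | ss, c :: rest, p =>
    match splitFirst ss c with
    | some ss' => bRef s ss' rest p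
    | none =>
      match splitFirst s c with
      | none => -1
      | some ss' => bRef s ss' rest (p + 1)

-- bGo computes bRef on the dropped source suffix
theorem bGo_eq_bRef (s : List Char) (t : List Char) (p : Int) (st : Nat) :
    bGo s t p st = bRef s (s.drop st) t p := by
  induction t generalizing p st with
  | nil => simp [bGo, bRef]
  | cons c rest ih =>
    simp only [bGo, bRef]
    cases hf : findFrom s c st with
    | some k =>
      rw [findFrom_some s c st k hf]
      exact ih p (k + 1)
    | none =>
      rw [(findFrom_none s c st).mp hf]
      cases hf0 : findFrom s c 0 with
      | some k =>
        have := findFrom_some s c 0 k hf0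
        simp only [List.drop_zero] at this
        rw [this]
        exact ih (p + 1) (k + 1)
      | none =>
        have := (findFrom_none s c 0).mp hf0
        simp only [List.drop_zero] at this
        rw [this]

-- bRef equals the A reference machine applied to the rest of the current pass
theorem bRef_eq_aRef (s : List Char) (t ss : List Char) (p : Int) :
    bRef s ss t p = aRef s (onePass ss t) p := by
  induction t generalizing ss p with
  | nil =>
    rw [aRef]
    simp [bRef, onePass]
  | cons c rest ih =>
    simp only [bRef]
    cases hsp : splitFirst ss c with
    | some ss' =>
      rw [onePass_some ss c rest ss' hsp]
      exact ih ss' p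
    | none =>
      rw [onePass_none ss c rest hsp]
      cases hs : splitFirst s c with
      | none =>
        rw [aRef]
        have h1 : onePass s (c :: rest) = c :: rest := onePass_none s c rest hs
        simp [h1]
      | some ss' =>
        have h1 : onePass s (c :: rest) = onePass ss' rest := onePass_some s c rest ss' hs
        rw [aRef]
        have hlt : (onePass s (c :: rest)).length < (c :: rest).length := by
          rw [h1]
          have := onePass_len_le ss' rest
          simp
          omega
        simp only [List.cons_ne_nil, reduceIte, hlt, dif_pos]
        rw [h1]
        exact ih ss' (p + 1)

-- A's inner pass characterised by onePass
theorem aInner_eq (t : List Char) (ss : List Char) (j : Nat) (f : Bool) (hj : j ≤ t.length) :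
    aInner t ss j f =
      (t.length - (onePass ss (t.drop j)).length,
       f || decide ((onePass ss (t.drop j)).length < (t.drop j).length)) := by
  induction ss generalizing j f with
  | nil =>
    cases hd : t.drop j with
    | nil =>
      have : t.length ≤ j := by
        have := congrArg List.length hd
        simp at this
        omega
      simp [aInner, onePass]
      omega
    | cons d u =>
      have hlen : (t.drop j).length = t.length - j := by simp
      simp [aInner, onePass]
      have : (d :: u).length = t.length - j := by rw [← hd]; simp
      simp at this
      omega
  | cons c ss ih =>
    by_cases hjl : j < t.length
    · have hd : t.drop j = t[j] :: t.drop (j + 1) := (List.drop_eq_getElem_cons hjl).symm ▸ rfl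
      simp only [aInner]
      by_cases hc : t[j]? = some c
      · have hcj : t[j] = c := by
          have := hc
          rw [List.getElem?_eq_getElem hjl] at this
          simpa using this
        rw [if_pos ⟨hjl, hc⟩]
        rw [ih (j + 1) true (by omega)]
        rw [hd, onePass]
        rw [if_pos hcj.symm]
        have hs := onePass_len_le ss (t.drop (j + 1))
        have hdl : (t.drop (j + 1)).length = t.length - (j + 1) := by simp
        simp
        exact Or.inr (by omega)
      · rw [if_neg (by intro hh; exact hc hh.2)]
        rw [ih j f hj]
        rw [hd, onePass]
        have hcj : ¬ c = t[j] := by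
          intro he
          exact hc (by rw [List.getElem?_eq_getElem hjl, he])
        rw [if_neg hcj]
    · have hje : j = t.length ∨ t.length < j := by omega
      have hd : t.drop j = [] := List.drop_eq_nil_of_le (by omega)
      simp only [aInner]
      rw [if_neg (by intro hh; exact hjl hh.1)]
      rw [ih j f hj]
      rw [hd]
      simp [onePass]

-- suffix gives back the drop index
theorem drop_of_suffix (t r : List Char) (h : r <:+ t) : t.drop (t.length - r.length) = r := by
  obtain ⟨u, hu⟩ := h
  subst hu
  simp

-- A's outer loop equals the A reference machine
theorem aLoop_eq_aRef (s t : List Char) (j : Nat) (p : Int) (hj : j ≤ t.length) :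
    aLoop s t j p = aRef s (t.drop j) p := by
  induction hn : t.length - j using Nat.strong_induction_on generalizing j p with
  | _ n ih =>
    rw [aLoop, aRef]
    by_cases hlt : j < t.length
    · rw [dif_pos hlt]
      have hne : t.drop j ≠ [] := by
        intro he
        have := congrArg List.length he
        simp at this
        omega
      rw [if_neg hne]
      rw [aInner_eq t s j false hj]
      simp only [Bool.false_or, decide_eq_true_eq]
      by_cases hprog : (onePass s (t.drop j)).length < (t.drop j).length
      · rw [dif_pos hprog, dif_pos hprog]
        have hsuf : onePass s (t.drop j) <:+ t :=
          (onePass_suffix s (t.drop j)).trans (List.drop_suffix j t)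
        have hrl : (onePass s (t.drop j)).length ≤ t.length := hsuf.length_le
        have hdl : (t.drop j).length = t.length - j := by simp
        have hj' : t.length - (onePass s (t.drop j)).length ≤ t.length := by omega
        have hmeas : t.length - (t.length - (onePass s (t.drop j)).length) < n := by omega
        rw [ih _ hmeas _ (p + 1) hj' rfl]
        rw [drop_of_suffix t _ hsuf]
      · rw [dif_neg hprog, dif_neg hprog]
    · rw [dif_neg hlt]
      have : t.drop j = [] := List.drop_eq_nil_of_le (by omega)
      rw [if_pos this]

theorem least_subsequence_spec : Claim_equal_least_subsequence := by
  intro source target _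
  unfold Spec_least_subsequence least_subsequence least_subsequence_alt
  rw [bGo_eq_bRef, List.drop_length, bRef_eq_aRef]
  have h0 : onePass ([] : List Char) target.toList = target.toList := by
    cases target.toList <;> simp [onePass]
  rw [h0, aLoop_eq_aRef source.toList target.toList 0 0 (by omega)]
  simp
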